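-- pv_equiv track=rewrite | github.com/xz-stjude/MitoEdit | pipelines/unified_pipeline.py | mark_bases
-- ===== SOURCE A (Python) =====
-- def mark_bases(sequence, target_position, off_target_positions):
--     target_position -= 1
--     off_target_positions = set(p - 1 for p in off_target_positions)
--     marked_sequence = []
--     for index, char in enumerate(sequence):
--         if index == target_position:
--             marked_sequence.append(f"[{char}]")
--         elif index in off_target_positions:
--             marked_sequence.append(f"{{{char}}}")
--         else:
--             marked_sequence.append(char)
--     return ''.join(marked_sequence)
-- ===== SOURCE B (Python) =====
-- def mark_bases(sequence, target_position, off_target_positions):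
--     # Build the character list once, then scatter-update only the marked slots;
--     # the target write comes last so it overrides a colliding off-target mark.
--     chars = list(sequence)
--     n = len(sequence)
--     for p in off_target_positions:
--         i = p - 1
--         if 0 <= i < n:
--             chars[i] = "{" + sequence[i] + "}"
--     i = target_position - 1
--     if 0 <= i < n:
--         chars[i] = "[" + sequence[i] + "]"
--     return "".join(chars)
-- ===== Notes on version B (the rewrite author's own statement) =====
-- stated objective: alternative
-- what changed: Instead of scanning every character and classifying it against the target index and an off-target set, B builds the character list once and scatter-updates only the (guarded, in-range) marked positions, writing the target mark last so it overrides collisions.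
import Mathlib
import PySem

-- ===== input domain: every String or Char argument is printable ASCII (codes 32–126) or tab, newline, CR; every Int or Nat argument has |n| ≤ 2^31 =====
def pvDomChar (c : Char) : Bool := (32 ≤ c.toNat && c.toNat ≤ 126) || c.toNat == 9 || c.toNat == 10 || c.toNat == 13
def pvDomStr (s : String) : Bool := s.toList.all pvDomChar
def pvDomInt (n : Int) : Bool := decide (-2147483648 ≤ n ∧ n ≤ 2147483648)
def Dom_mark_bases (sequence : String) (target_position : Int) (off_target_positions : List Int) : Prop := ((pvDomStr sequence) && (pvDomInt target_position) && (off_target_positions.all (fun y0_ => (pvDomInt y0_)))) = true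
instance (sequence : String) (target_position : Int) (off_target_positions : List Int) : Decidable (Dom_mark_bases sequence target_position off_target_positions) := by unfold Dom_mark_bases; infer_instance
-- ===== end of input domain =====

-- B replaces A's full classifying scan by a build-then-scatter-update pass (alternative decomposition, same cost).

-- ===== PORT A =====
def mark_bases (sequence : String) (target_position : Int) (off_target_positions : List Int) : String :=
  let tp := target_position - 1
  let offset : PySem.Set Int := PySem.Set.ofList (off_target_positions.map (fun p => p - 1))
  let marked : List String := (PySem.List.enumerate sequence.toList).foldl
    (fun acc ic =>
      if ic.1 == tp then acc ++ ["[" ++ String.ofList [ic.2] ++ "]"]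
      else if PySem.Set.contains offset ic.1 then acc ++ ["{" ++ String.ofList [ic.2] ++ "}"]
      else acc ++ [String.ofList [ic.2]])
    []
  PySem.Str.join "" marked

-- ===== PORT B =====
-- s.getD i.toNat ' ' ports Python's sequence[i]: exact because every access is guarded by 0 ≤ i < len.
def mark_bases_alt (sequence : String) (target_position : Int) (off_target_positions : List Int) : String :=
  let s := sequence.toList
  let n : Int := s.length
  let chars0 : List String := s.map (fun c => String.ofList [c])
  let chars1 := off_target_positions.foldl
    (fun ch p =>
      let i := p - 1
      if 0 ≤ i ∧ i < n then ch.set i.toNat ("{" ++ String.ofList [s.getD i.toNat ' '] ++ "}") else ch)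
    chars0
  let i := target_position - 1
  let chars2 := if 0 ≤ i ∧ i < n then chars1.set i.toNat ("[" ++ String.ofList [s.getD i.toNat ' '] ++ "]") else chars1
  PySem.Str.join "" chars2

-- ===== PRECONDITION & SPEC =====
def Spec_mark_bases (sequence : String) (target_position : Int) (off_target_positions : List Int) (out : String) : Prop := out = mark_bases_alt sequence target_position off_target_positions
instance (sequence : String) (target_position : Int) (off_target_positions : List Int) (out : String) : Decidable (Spec_mark_bases sequence target_position off_target_positions out) := by unfold Spec_mark_bases; infer_instance

-- ===== CLAIM (what is proved, stated in full; the proofs are below) =====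
def Claim_equal_mark_bases : Prop := ∀ (sequence : String) (target_position : Int) (off_target_positions : List Int), Dom_mark_bases sequence target_position off_target_positions → Spec_mark_bases sequence target_position off_target_positions (mark_bases sequence target_position off_target_positions)

-- ===== LEMMAS AND PROOFS =====

-- A's fold appends one marked string per character.
theorem foldl_marks (tp : Int) (offset : PySem.Set Int) (l : List (Int × Char)) (a : List String) :
    l.foldl
      (fun acc ic =>
        if ic.1 == tp then acc ++ ["[" ++ String.ofList [ic.2] ++ "]"]
        else if PySem.Set.contains offset ic.1 then acc ++ ["{" ++ String.ofList [ic.2] ++ "}"]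
        else acc ++ [String.ofList [ic.2]]) a =
    a ++ l.map
      (fun ic =>
        if ic.1 == tp then "[" ++ String.ofList [ic.2] ++ "]"
        else if PySem.Set.contains offset ic.1 then "{" ++ String.ofList [ic.2] ++ "}"
        else String.ofList [ic.2]) := by
  induction l generalizing a with
  | nil => simp
  | cons ic rest ih =>
    simp only [List.foldl, List.map]
    split_ifs <;> rw [ih] <;> simp

-- B's off-target pass preserves the length …
theorem foldl_set_length (s : List Char) (offs : List Int) (ch : List String) :
    (offs.foldl
      (fun ch p =>
        let i := p - 1
        if 0 ≤ i ∧ i < (s.length : Int) then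
          ch.set i.toNat ("{" ++ String.ofList [s.getD i.toNat ' '] ++ "}") else ch)
      ch).length = ch.length := by
  induction offs generalizing ch with
  | nil => rfl
  | cons p rest ih => simp only [List.foldl]; rw [ih]; split <;> simp

-- … and, characterised slot by slot, braces exactly the listed positions.
theorem foldl_set_braces (s : List Char) (offs : List Int) (ch : List String)
    (hlen : ch.length = s.length) (j : Nat) (hj : j < s.length) :
    (offs.foldl
      (fun ch p =>
        let i := p - 1
        if 0 ≤ i ∧ i < (s.length : Int) then
          ch.set i.toNat ("{" ++ String.ofList [s.getD i.toNat ' '] ++ "}") else ch)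
      ch)[j]? =
    if (j : Int) ∈ offs.map (fun p => p - 1) then
      some ("{" ++ String.ofList [s.getD j ' '] ++ "}")
    else ch[j]? := by
  induction offs generalizing ch with
  | nil => simp
  | cons p rest ih =>
    simp only [List.foldl, List.map, List.mem_cons]
    by_cases hp : 0 ≤ p - 1 ∧ p - 1 < (s.length : Int)
    · rw [if_pos hp, ih _ (by simp [hlen])]
      by_cases hmem : (j : Int) ∈ rest.map (fun p => p - 1)
      · simp [hmem]
      · rw [if_neg hmem]
        by_cases hje : (j : Int) = p - 1
        · have hji : (p - 1).toNat = j := by omega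
          simp [hji, hje, List.getElem?_set]
          omega
        · have hne : ¬ (p.toNat - 1 = j) := by omega
          simp [List.getElem?_set, hne, hje, hmem]
    · rw [if_neg hp, ih _ hlen]
      have hje : ¬ ((j : Int) = p - 1) := by omega
      simp [hje]

theorem mark_bases_eq_alt (sequence : String) (target_position : Int)
    (off_target_positions : List Int) :
    mark_bases sequence target_position off_target_positions =
      mark_bases_alt sequence target_position off_target_positions := by
  unfold mark_bases mark_bases_alt
  simp only []
  rw [foldl_marks, List.nil_append]
  apply congrArg (PySem.Str.join "")
  set s := sequence.toList with hs
  set tp := target_position - 1 with htp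
  set offsm := off_target_positions.map (fun p => p - 1) with hoffsm
  apply List.ext_getElem?
  intro j
  by_cases hj : j < s.length
  · rw [List.getElem?_map, PySem.List.getElem?_enumerate, List.getElem?_eq_getElem hj]
    simp only [Option.map_some, zero_add]
    have hlen1 : (off_target_positions.foldl
        (fun ch p =>
          let i := p - 1
          if 0 ≤ i ∧ i < (s.length : Int) then
            ch.set i.toNat ("{" ++ String.ofList [s.getD i.toNat ' '] ++ "}") else ch)
        (s.map (fun c => String.ofList [c]))).length = s.length := by
      rw [foldl_set_length, List.length_map]
    have hbr := foldl_set_braces s off_target_positions (s.map (fun c => String.ofList [c]))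
      (by simp) j hj
    rw [← hoffsm] at hbr
    by_cases htgt : 0 ≤ tp ∧ tp < (s.length : Int)
    · rw [if_pos htgt]
      by_cases hje : (j : Int) = tp
      · have hji : tp.toNat = j := by omega
        have hbeq : ((j : Int) == tp) = true := by simpa using hje
        rw [List.getElem?_set]
        simp only [hji, if_pos rfl, hlen1, hj, if_pos hj, hbeq, if_true]
        rw [List.getD_eq_getElem s ' ' (hji ▸ hj)]
      · have hbeq : ((j : Int) == tp) = false := by simpa using hje
        have hne : ¬ (tp.toNat = j) := by omega
        rw [List.getElem?_set, if_neg hne, hbr]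
        simp only [hbeq, Bool.false_eq_true, if_false]
        by_cases hmem : (j : Int) ∈ offsm
        · have hc : PySem.Set.contains (PySem.Set.ofList offsm) (j : Int) = true := by
            rw [PySem.Set.contains_iff, PySem.Set.mem_ofList]; exact hmem
          simp [hmem, hc, List.getD_eq_getElem s ' ' hj, List.getElem?_eq_getElem hj]
        · have hc : PySem.Set.contains (PySem.Set.ofList offsm) (j : Int) = false := by
            rw [Bool.eq_false_iff]
            intro h
            exact hmem ((PySem.Set.mem_ofList _ _).mp ((PySem.Set.contains_iff _ _).mp h))
          simp [hmem, hc, List.getElem?_map, List.getElem?_eq_getElem hj]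
    · rw [if_neg htgt]
      have hbeq : ((j : Int) == tp) = false := by
        simp only [beq_eq_false_iff_ne, ne_eq]; omega
      rw [hbr]
      simp only [hbeq, Bool.false_eq_true, if_false]
      by_cases hmem : (j : Int) ∈ offsm
      · have hc : PySem.Set.contains (PySem.Set.ofList offsm) (j : Int) = true := by
          rw [PySem.Set.contains_iff, PySem.Set.mem_ofList]; exact hmem
        simp [hmem, hc, List.getD_eq_getElem s ' ' hj, List.getElem?_eq_getElem hj]
      · have hc : PySem.Set.contains (PySem.Set.ofList offsm) (j : Int) = false := by
          rw [Bool.eq_false_iff]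
          intro h
          exact hmem ((PySem.Set.mem_ofList _ _).mp ((PySem.Set.contains_iff _ _).mp h))
        simp [hmem, hc, List.getElem?_map, List.getElem?_eq_getElem hj]
  · have h1 : ∀ (l : List String), l.length = s.length → l[j]? = none := by
      intro l hl; apply List.getElem?_eq_none; omega
    rw [h1 _ (by simp [PySem.List.length_enumerate])]
    symm
    have hlen1 : (off_target_positions.foldl
        (fun ch p =>
          let i := p - 1
          if 0 ≤ i ∧ i < (s.length : Int) then
            ch.set i.toNat ("{" ++ String.ofList [s.getD i.toNat ' '] ++ "}") else ch)
        (s.map (fun c => String.ofList [c]))).length = s.length := by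
      rw [foldl_set_length, List.length_map]
    split
    · exact h1 _ (by rw [List.length_set, hlen1])
    · exact h1 _ hlen1

-- ===== VERDICT (by name: the statement is the Claim_ definition above) =====
theorem mark_bases_spec : Claim_equal_mark_bases := by
  intro sequence target_position off_target_positions _
  unfold Spec_mark_bases
  exact mark_bases_eq_alt sequence target_position off_target_positions
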